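-- pv_equiv track=rewrite | github.com/hpides/alsatian | model_search/approaches/shift.py | get_data_ranges
-- ===== SOURCE A (Python) =====
-- import math
--
-- def get_data_ranges(search_space_len, train_data_len) -> [int]:
--     ranges = []
--     iterations = math.ceil(math.log(search_space_len, 2))
--     items_to_process = math.ceil(train_data_len / 2 ** iterations)
--     items_seen = 0
--     prev_end = 0
--
--     for i in range(iterations):
--         new_end = items_to_process + items_seen
--         ranges.append([prev_end, new_end])
--         prev_end = new_end
--         items_seen += items_to_process
--         items_to_process = items_to_process * 2
--
--     if ranges[-1][1] < train_data_len:
--         # make sure the last range covers all data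
--         ranges[-1][1] = train_data_len
--     else:
--         message = (f"train data to small for search space: for a search space with length {search_space_len},"
--                    f" we need a dataset with at least {ranges[-1][1]} items")
--         raise Exception(message)
--
--     return ranges
-- ===== SOURCE B (Python) =====
-- import math
--
-- def get_data_ranges(search_space_len, train_data_len) -> [int]:
--     # exact integer ceil(log2): no float-log rounding
--     iterations = (search_space_len - 1).bit_length()
--     base = -(-train_data_len // (1 << iterations))  # integer ceil division
--     # k-th boundary is base*(2^k - 1): closed-form prefix sum of the doubling sizes
--     bounds = [base * ((1 << k) - 1) for k in range(iterations + 1)]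
--     ranges = [[lo, hi] for lo, hi in zip(bounds, bounds[1:])]
--     if ranges[-1][1] < train_data_len:
--         # make sure the last range covers all data
--         ranges[-1][1] = train_data_len
--     else:
--         message = (f"train data to small for search space: for a search space with length {search_space_len},"
--                    f" we need a dataset with at least {ranges[-1][1]} items")
--         raise Exception(message)
--     return ranges
-- ===== Notes on version B (the rewrite author's own statement) =====
-- stated objective: alternative
-- what changed: Replaces A's loop threading prev_end/items_seen/items_to_process accumulators with the closed-form boundary list base*(2^k-1) zipped with its tail, and computes ceil(log2) by exact integer bit_length instead of float math.log.
-- intended difference: At search_space_len = 2^29 and 2^31 float math.log rounds ceil(log2) one too high, so A returns one extra, needlessly fine range split; B returns the intended ceil(log2 s) doubling ranges covering the same data, which is what the function's purpose (one range per halving of the search space) requires. — e.g. on get_data_ranges(536870912, 2147483648): A returns [[0, 2], [2, 6], [6, 14], [14, 30], [30, 62], [62, 126], [126, 254], [254, 510], [510, 1022], [1022, 2046], [2046, 4094…, B returns [[0, 4], [4, 12], [12, 28], [28, 60], [60, 124], [124, 252], [252, 508], [508, 1020], [1020, 2044], [2044, 4092], [4092…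
import Mathlib
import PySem

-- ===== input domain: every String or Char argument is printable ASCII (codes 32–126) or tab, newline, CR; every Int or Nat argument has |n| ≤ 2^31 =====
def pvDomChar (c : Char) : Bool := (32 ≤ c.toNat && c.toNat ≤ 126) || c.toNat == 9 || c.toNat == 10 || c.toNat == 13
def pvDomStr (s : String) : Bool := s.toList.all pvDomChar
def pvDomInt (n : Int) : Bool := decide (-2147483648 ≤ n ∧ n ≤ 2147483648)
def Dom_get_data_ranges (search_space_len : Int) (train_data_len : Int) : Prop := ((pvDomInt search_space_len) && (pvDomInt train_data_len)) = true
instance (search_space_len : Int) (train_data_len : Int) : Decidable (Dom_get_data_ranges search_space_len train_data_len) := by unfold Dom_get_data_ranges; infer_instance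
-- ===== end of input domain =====

-- B replaces A's loop of threaded accumulators (prev_end/items_seen/items_to_process) by the closed-form
-- boundary list base*(2^k - 1) zipped with its tail, and uses exact integer ceil-log2 instead of float math.log
-- (an intended difference at s = 2^29 and s = 2^31, where float rounding gives A one extra range).

-- ===== PORT A =====
-- Port of 'math.ceil(math.log(n, 2))' (float!): for 1 ≤ n ≤ 2^31 it equals the exact ceiling log2
-- (= bitLength (n-1)) EXCEPT at n = 2^29 and n = 2^31, where the float log lands just above the integer
-- (math.log(2**29, 2) = 29.000000000000004, ceil = 30); verified at every power of two and its
-- neighbours in the domain, and by random sampling (only powers of two can be affected: for any other n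
-- log2 n is ≥ 6e-10 from an integer while the float error is < 1e-13).
def pyCeilLog2 (n : Int) : Nat :=
  PySem.Int.bitLength (n - 1) + (if n = 536870912 ∨ n = 2147483648 then 1 else 0)

def get_data_ranges (search_space_len : Int) (train_data_len : Int) : List (List Int) :=
  let iterations := pyCeilLog2 search_space_len
  -- math.ceil(train_data_len / 2 ** iterations): the float division by a power of two is exact for
  -- |train_data_len| ≤ 2^31 < 2^53, so this is exact ceiling division -((-t) // 2^iterations)
  let items_to_process := -(PySem.Int.floordiv (-train_data_len) ((2:Int) ^ iterations))
  -- state: (ranges, items_seen, prev_end, items_to_process)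
  let st := (PySem.List.pyRange 0 (iterations : Int) 1).foldl
    (fun (acc : List (List Int) × Int × Int × Int) _ =>
      let new_end := acc.2.2.2 + acc.2.1
      (acc.1 ++ [[acc.2.2.1, new_end]], acc.2.1 + acc.2.2.2, new_end, acc.2.2.2 * 2))
    ([], 0, 0, items_to_process)
  match st.1.getLast? with
  | some [lo, hi] =>
      if hi < train_data_len then st.1.dropLast ++ [[lo, train_data_len]]
      else []                                    -- Python: raise Exception (outside Pre_)
  | _ => []                                      -- Python: IndexError on ranges[-1] (outside Pre_)

-- ===== PORT B =====
def get_data_ranges_alt (search_space_len : Int) (train_data_len : Int) : List (List Int) :=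
  let iterations := PySem.Int.bitLength (search_space_len - 1)   -- (s-1).bit_length()
  let base := -(PySem.Int.floordiv (-train_data_len) ((2:Int) ^ iterations))  -- -(-t // (1 << it))
  let bounds := (List.range (iterations + 1)).map (fun k => base * ((2:Int) ^ k - 1))
  let ranges := (bounds.zip bounds.tail).map (fun p => [p.1, p.2])
  match PySem.List.pyGet? ranges (-1) with    -- ranges[-1]
  | none => []                                   -- Python: IndexError on ranges[-1] (outside Pre_)
  | some last =>
      if PySem.List.pyGetD last 1 0 < train_data_len then
        ranges.dropLast ++ [[PySem.List.pyGetD last 0 0, train_data_len]]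
      else []                                    -- Python: raise Exception (outside Pre_)

-- ===== PRECONDITION & SPEC =====
-- Pre_ excludes exactly the inputs on which A raises: search_space_len ≤ 0 (math domain error),
-- search_space_len = 1 (zero iterations, IndexError on ranges[-1]) and train data too small for the
-- search space (A's explicit Exception: last computed end ≥ train_data_len).
def Pre_get_data_ranges (search_space_len : Int) (train_data_len : Int) : Prop :=
  2 ≤ search_space_len ∧
  (let k := PySem.Int.bitLength (search_space_len - 1) +
      (if search_space_len = 536870912 ∨ search_space_len = 2147483648 then 1 else 0);
   -(PySem.Int.floordiv (-train_data_len) ((2:Int) ^ k)) * ((2:Int) ^ k - 1) < train_data_len)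
instance (search_space_len : Int) (train_data_len : Int) : Decidable (Pre_get_data_ranges search_space_len train_data_len) := by unfold Pre_get_data_ranges; infer_instance

def pvWitness_get_data_ranges : Int × Int := (8, 100)

-- A computes iterations with float math.log, which rounds ceil(log2 s) one too high exactly at
-- s = 2^29 and s = 2^31; A there returns one extra, needlessly fine range split, while B returns the
-- intended ceil(log2 s) doubling ranges covering the same data.
def D_get_data_ranges (search_space_len : Int) (train_data_len : Int) : Prop :=
  search_space_len = 536870912 ∨ search_space_len = 2147483648
instance (search_space_len : Int) (train_data_len : Int) : Decidable (D_get_data_ranges search_space_len train_data_len) := by unfold D_get_data_ranges; infer_instance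

def Spec_get_data_ranges (search_space_len : Int) (train_data_len : Int) (out : List (List Int)) : Prop := ¬ D_get_data_ranges search_space_len train_data_len → out = get_data_ranges_alt search_space_len train_data_len
instance (search_space_len : Int) (train_data_len : Int) (out : List (List Int)) : Decidable (Spec_get_data_ranges search_space_len train_data_len out) := by unfold Spec_get_data_ranges; infer_instance

def pvDiffWitness_get_data_ranges : Int × Int := (536870912, 2147483648)
def pvDiffWitnessOut_get_data_ranges : (List (List Int)) × (List (List Int)) :=
  ([[0, 2], [2, 6], [6, 14], [14, 30], [30, 62], [62, 126], [126, 254], [254, 510], [510, 1022], [1022, 2046], [2046, 4094], [4094, 8190], [8190, 16382], [16382, 32766], [32766, 65534], [65534, 131070], [131070, 262142], [262142, 524286], [524286, 1048574], [1048574, 2097150], [2097150, 4194302], [4194302, 8388606], [8388606, 16777214], [16777214, 33554430], [33554430, 67108862], [67108862, 134217726], [134217726, 268435454], [268435454, 536870910], [536870910, 1073741822], [1073741822, 2147483648]],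
   [[0, 4], [4, 12], [12, 28], [28, 60], [60, 124], [124, 252], [252, 508], [508, 1020], [1020, 2044], [2044, 4092], [4092, 8188], [8188, 16380], [16380, 32764], [32764, 65532], [65532, 131068], [131068, 262140], [262140, 524284], [524284, 1048572], [1048572, 2097148], [2097148, 4194300], [4194300, 8388604], [8388604, 16777212], [16777212, 33554428], [33554428, 67108860], [67108860, 134217724], [134217724, 268435452], [268435452, 536870908], [536870908, 1073741820], [1073741820, 2147483648]])

-- ===== CLAIM (what is proved, stated in full; the proofs are below) =====
def Claim_unchanged_get_data_ranges : Prop := ∀ (search_space_len : Int) (train_data_len : Int), Dom_get_data_ranges search_space_len train_data_len → Pre_get_data_ranges search_space_len train_data_len → Spec_get_data_ranges search_space_len train_data_len (get_data_ranges search_space_len train_data_len)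
def Claim_changed_get_data_ranges : Prop := Dom_get_data_ranges (pvDiffWitness_get_data_ranges.1) (pvDiffWitness_get_data_ranges.2) ∧ Pre_get_data_ranges (pvDiffWitness_get_data_ranges.1) (pvDiffWitness_get_data_ranges.2) ∧ D_get_data_ranges (pvDiffWitness_get_data_ranges.1) (pvDiffWitness_get_data_ranges.2) ∧ get_data_ranges (pvDiffWitness_get_data_ranges.1) (pvDiffWitness_get_data_ranges.2) = pvDiffWitnessOut_get_data_ranges.1 ∧ get_data_ranges_alt (pvDiffWitness_get_data_ranges.1) (pvDiffWitness_get_data_ranges.2) = pvDiffWitnessOut_get_data_ranges.2 ∧ pvDiffWitnessOut_get_data_ranges.1 ≠ pvDiffWitnessOut_get_data_ranges.2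
def Claim_exact_get_data_ranges : Prop := ∀ (search_space_len : Int) (train_data_len : Int), Dom_get_data_ranges search_space_len train_data_len → Pre_get_data_ranges search_space_len train_data_len → D_get_data_ranges search_space_len train_data_len → get_data_ranges search_space_len train_data_len ≠ get_data_ranges_alt search_space_len train_data_len

-- ===== LEMMAS AND PROOFS =====
-- canonical form both ports are reduced to
def rangesSpec (base : Int) (n : Nat) : List (List Int) :=
  (List.range n).map (fun i => [base * ((2:Int) ^ i - 1), base * ((2:Int) ^ (i+1) - 1)])

def build (k : Nat) (t : Int) : List (List Int) :=
  let base := -(PySem.Int.floordiv (-t) ((2:Int) ^ k))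
  let rs := rangesSpec base k
  match rs.getLast? with
  | some [lo, hi] => if hi < t then rs.dropLast ++ [[lo, t]] else []
  | _ => []

lemma loopA (n : Nat) (base : Int) :
    (PySem.List.pyRange 0 (n : Int) 1).foldl
      (fun (acc : List (List Int) × Int × Int × Int) _ =>
        let new_end := acc.2.2.2 + acc.2.1
        (acc.1 ++ [[acc.2.2.1, new_end]], acc.2.1 + acc.2.2.2, new_end, acc.2.2.2 * 2))
      ([], 0, 0, base)
    = (rangesSpec base n, base * ((2:Int) ^ n - 1), base * ((2:Int) ^ n - 1), base * (2:Int) ^ n) := by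
  rw [PySem.List.pyRange_zero_natCast]
  induction n with
  | zero => simp [rangesSpec]
  | succ m ih =>
    rw [List.range_succ, List.map_append, List.foldl_append, ih]
    simp only [List.map_cons, List.map_nil, List.foldl_cons, List.foldl_nil, rangesSpec,
      List.range_succ, List.map_append]
    refine Prod.ext ?_ (Prod.ext ?_ (Prod.ext ?_ ?_)) <;> simp <;> ring

lemma zipB (n : Nat) (base : Int) :
    ((((List.range (n+1)).map (fun k => base * ((2:Int) ^ k - 1))).zip
      (((List.range (n+1)).map (fun k => base * ((2:Int) ^ k - 1))).tail)).map
        (fun p => [p.1, p.2])) = rangesSpec base n := by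
  apply List.ext_getElem
  · simp [rangesSpec]
  · intro i h1 h2
    simp only [rangesSpec, List.getElem_map, List.getElem_zip, List.getElem_tail,
      List.getElem_range]

lemma rangesSpec_succ (base : Int) (m : Nat) :
    rangesSpec base (m+1)
      = rangesSpec base m ++ [[base * ((2:Int) ^ m - 1), base * ((2:Int) ^ (m+1) - 1)]] := by
  simp [rangesSpec, List.range_succ]

lemma portA_eq (s t : Int) : get_data_ranges s t = build (pyCeilLog2 s) t := by
  simp only [get_data_ranges, build, loopA]

lemma portB_eq (s t : Int) :
    get_data_ranges_alt s t = build (PySem.Int.bitLength (s - 1)) t := by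
  simp only [get_data_ranges_alt, build, zipB, PySem.List.pyGet?_neg_one]
  generalize PySem.Int.bitLength (s - 1) = k
  cases k with
  | zero => rfl
  | succ m =>
    rw [rangesSpec_succ, List.getLast?_concat]
    simp [PySem.List.pyGetD]

lemma build_length_le (k : Nat) (t : Int) : (build k t).length ≤ k := by
  cases k with
  | zero => simp [build, rangesSpec]
  | succ m =>
    simp only [build, rangesSpec_succ, List.getLast?_concat]
    split_ifs with h
    · simp [rangesSpec]
    · simp

lemma build_length_of (k : Nat) (t : Int) (hk : 0 < k)
    (hc : -(PySem.Int.floordiv (-t) ((2:Int) ^ k)) * ((2:Int) ^ k - 1) < t) :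
    (build k t).length = k := by
  obtain ⟨m, rfl⟩ : ∃ m, k = m + 1 := ⟨k - 1, by omega⟩
  simp only [build, rangesSpec_succ, List.getLast?_concat]
  rw [if_pos hc]
  simp [rangesSpec]

-- ===== VERDICT (by name: the statement is the Claim_ definition above) =====
theorem get_data_ranges_spec : Claim_unchanged_get_data_ranges := by
  intro s t _ hpre
  unfold Spec_get_data_ranges
  intro hnd
  unfold D_get_data_ranges at hnd
  rw [portA_eq, portB_eq]
  unfold pyCeilLog2
  rw [if_neg hnd, Nat.add_zero]

theorem get_data_ranges_changed : Claim_changed_get_data_ranges := by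
  unfold Claim_changed_get_data_ranges; decide

theorem get_data_ranges_tight : Claim_exact_get_data_ranges := by
  intro s t _ hpre hd
  rw [portA_eq, portB_eq]
  intro heq
  have hlen := congrArg List.length heq
  obtain ⟨h2, hc⟩ := hpre
  rcases hd with rfl | rfl
  · have hA : (build (pyCeilLog2 536870912) t).length = 30 := by
      have : pyCeilLog2 536870912 = 30 := by decide
      rw [this]
      exact build_length_of 30 t (by omega) (by simpa [this] using hc)
    have hB : (build (PySem.Int.bitLength ((536870912:Int) - 1)) t).length ≤ 29 := by
      have : PySem.Int.bitLength ((536870912:Int) - 1) = 29 := by decide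
      rw [this]; exact build_length_le 29 t
    omega
  · have hA : (build (pyCeilLog2 2147483648) t).length = 32 := by
      have : pyCeilLog2 2147483648 = 32 := by decide
      rw [this]
      exact build_length_of 32 t (by omega) (by simpa [this] using hc)
    have hB : (build (PySem.Int.bitLength ((2147483648:Int) - 1)) t).length ≤ 31 := by
      have : PySem.Int.bitLength ((2147483648:Int) - 1) = 31 := by decide
      rw [this]; exact build_length_le 31 t
    omega
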